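-- pv_equiv track=rewrite | github.com/soujanya957/ReCognize | model/DataProcessing/transpose_mp3txt_to_char.py | add_timestamps
-- ===== SOURCE A (Python) =====
-- def add_timestamps(text, timestamps=None):
--     """Add timestamps to the text in CHA format"""
--     if not timestamps:
--         # If no timestamps, create synthetic ones
--         words = text.split()
--         result = []
--         current_time = 0
--         chunk_size = min(10, max(3, len(words) // 5))  # Create chunks of words
--
--         for i in range(0, len(words), chunk_size):
--             chunk = words[i:i+chunk_size]
--             chunk_text = ' '.join(chunk)
--             start_time = current_time
--             # Approximate 200ms per word
--             end_time = current_time + (len(chunk) * 200)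
--             result.append(f"{chunk_text} {start_time}_{end_time}")
--             current_time = end_time
--
--         return ' '.join(result)
--     else:
--         # Use provided timestamps
--         # This would need to be customized based on the actual timestamp format
--         pass
-- ===== SOURCE B (Python) =====
-- def add_timestamps(text, timestamps=None):
--     """Add timestamps to the text in CHA format"""
--     if timestamps:
--         return None
--     words = text.split()
--     n = len(words)
--     chunk_size = min(10, max(3, n // 5))
--     # Single flat pass over the words: emit each word, and right after the last
--     # word of each chunk emit that chunk's timestamp token, computed in closed
--     # form from the 1-based word index j (chunk start = chunk_size*((j-1)//chunk_size)).
--     tokens = []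
--     for j, w in enumerate(words, 1):
--         tokens.append(w)
--         if j % chunk_size == 0 or j == n:
--             tokens.append(f"{200 * chunk_size * ((j - 1) // chunk_size)}_{200 * j}")
--     return ' '.join(tokens)
-- ===== Notes on version B (the rewrite author's own statement) =====
-- stated objective: alternative
-- what changed: A builds each chunk by slicing and joins it with a threaded current_time accumulator; B never slices or accumulates: it makes one flat pass over the words, emitting each word and, at chunk boundaries, a timestamp token computed in closed form from the word index, then joins the single token stream once.
import Mathlib
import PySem

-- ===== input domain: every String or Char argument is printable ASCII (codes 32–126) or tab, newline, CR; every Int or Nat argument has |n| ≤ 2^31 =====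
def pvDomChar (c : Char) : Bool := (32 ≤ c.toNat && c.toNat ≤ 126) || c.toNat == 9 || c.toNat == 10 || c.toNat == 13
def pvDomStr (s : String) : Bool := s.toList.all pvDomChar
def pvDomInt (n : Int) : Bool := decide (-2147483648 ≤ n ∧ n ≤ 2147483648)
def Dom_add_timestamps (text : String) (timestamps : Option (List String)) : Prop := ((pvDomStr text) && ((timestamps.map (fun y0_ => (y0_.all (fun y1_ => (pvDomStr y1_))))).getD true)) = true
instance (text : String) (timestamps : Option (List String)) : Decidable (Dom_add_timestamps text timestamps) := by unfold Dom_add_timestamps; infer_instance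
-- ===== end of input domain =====

-- B replaces A's chunk-by-chunk loop (slice, join, threaded current_time) by ONE flat pass over the
-- words that emits each word and, at chunk boundaries, a timestamp token computed in closed form from
-- the word index; the result is a single join of that token stream (objective: alternative).


-- ===== PORT A =====
def add_timestamps (text : String) (timestamps : Option (List String)) : Option String :=
  if (timestamps.getD []).isEmpty then
    let words := PySem.Str.split₀ text
    let chunk_size : Int := min 10 (max 3 (PySem.Int.floordiv (words.length : Int) 5))
    let st := (PySem.List.pyRange 0 (words.length : Int) chunk_size).foldl
      (fun (st : List String × Int) (i : Int) =>
        let chunk := PySem.List.slice words (some i) (some (i + chunk_size))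
        let chunk_text := PySem.Str.join " " chunk
        let start_time := st.2
        let end_time := st.2 + (chunk.length : Int) * 200
        (st.1 ++ [chunk_text ++ " " ++ PySem.Int.toStr start_time ++ "_" ++ PySem.Int.toStr end_time],
         end_time))
      ([], 0)
    some (PySem.Str.join " " st.1)
  else none

-- ===== PORT B =====
-- B's per-word loop: emit the word; at a chunk boundary (j % cs == 0 or j == n) also emit the
-- timestamp token computed in closed form from the 1-based index j.
def pvBTokens (cs n : Int) (j : Int) (ws : List String) : List String :=
  match ws with
  | [] => []
  | w :: rest =>
      (if PySem.Int.mod j cs == 0 || j == n then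
         [w, PySem.Int.toStr (200 * cs * PySem.Int.floordiv (j - 1) cs) ++ "_" ++ PySem.Int.toStr (200 * j)]
       else [w]) ++ pvBTokens cs n (j + 1) rest

def add_timestamps_alt (text : String) (timestamps : Option (List String)) : Option String :=
  match timestamps with
  | some (_ :: _) => none
  | _ =>
    let words := PySem.Str.split₀ text
    let n : Int := words.length
    let chunk_size : Int := min 10 (max 3 (PySem.Int.floordiv n 5))
    some (PySem.Str.join " " (pvBTokens chunk_size n 1 words))

-- ===== PRECONDITION & SPEC =====
def Spec_add_timestamps (text : String) (timestamps : Option (List String)) (out : Option String) : Prop := out = add_timestamps_alt text timestamps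
instance (text : String) (timestamps : Option (List String)) (out : Option String) : Decidable (Spec_add_timestamps text timestamps out) := by unfold Spec_add_timestamps; infer_instance

-- ===== CLAIM (what is proved, stated in full; the proofs are below) =====
def Claim_equal_add_timestamps : Prop := ∀ (text : String) (timestamps : Option (List String)), Dom_add_timestamps text timestamps → Spec_add_timestamps text timestamps (add_timestamps text timestamps)

-- ===== LEMMAS AND PROOFS =====

-- join on cons-of-cons and on append of nonempty lists
theorem pvJoinCons (s x y : String) (l : List String) :
    PySem.Str.join s (x :: y :: l) = x ++ s ++ PySem.Str.join s (y :: l) := by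
  simp [PySem.Str.join, PySem.Chars.join_cons_cons]
  rw [← String.toList_inj]; simp

theorem pvJoinSingleton (s x : String) : PySem.Str.join s [x] = x := by
  rw [← String.toList_inj]
  simp [PySem.Str.join, PySem.Chars.join_singleton]

theorem pvJoinAppend (l1 l2 : List String) (h1 : l1 ≠ []) (h2 : l2 ≠ []) :
    PySem.Str.join " " (l1 ++ l2) = PySem.Str.join " " l1 ++ " " ++ PySem.Str.join " " l2 := by
  induction l1 with
  | nil => simp at h1
  | cons x xs ih =>
    cases xs with
    | nil =>
      cases l2 with
      | nil => simp at h2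
      | cons y t => simp [pvJoinCons, pvJoinSingleton]
    | cons x2 rest =>
      have := ih (by simp)
      rw [List.cons_append, List.cons_append, pvJoinCons, pvJoinCons, ← List.cons_append, this]
      rw [← String.toList_inj]; simp

-- pyRange with positive step: empty and cons forms
theorem pvPyRange_pos_nil (a b s : Int) (hs : 0 < s) (hba : b ≤ a) :
    PySem.List.pyRange a b s = [] := by
  rw [PySem.List.pyRange_of_pos a b hs]
  simp [show ¬ a < b by omega]

theorem pvPyRange_pos_cons (a b s : Int) (hs : 0 < s) (hab : a < b) :
    PySem.List.pyRange a b s = a :: PySem.List.pyRange (a + s) b s := by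
  rw [PySem.List.pyRange_of_pos a b hs, PySem.List.pyRange_of_pos (a + s) b hs]
  by_cases h2 : a + s < b
  · have hq : (b - a + s - 1) / s = (b - (a + s) + s - 1) / s + 1 := by
      have : b - a + s - 1 = (b - (a + s) + s - 1) + 1 * s := by ring
      rw [this, Int.add_mul_ediv_right _ _ (by omega : s ≠ 0)]
    have hnn : 0 ≤ (b - (a + s) + s - 1) / s := Int.ediv_nonneg (by omega) (by omega)
    simp only [if_pos hab, if_pos h2, hq]
    have htn : ((b - (a + s) + s - 1) / s + 1).toNat = ((b - (a + s) + s - 1) / s).toNat + 1 := by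
      omega
    rw [htn, List.range_succ_eq_map]
    simp only [List.map_cons, List.map_map]
    congr 1
    · simp
    · apply List.map_congr_left
      intro k _
      simp only [Function.comp, Nat.succ_eq_add_one]
      push_cast
      ring
  · have hq : (b - a + s - 1) / s = 1 := by
      have h1 : (1 : Int) ≤ (b - a + s - 1) / s :=
        (Int.le_ediv_iff_mul_le hs).2 (by omega)
      have h2' : (b - a + s - 1) / s < 2 :=
        (Int.ediv_lt_iff_lt_mul hs).2 (by omega)
      omega
    simp only [if_pos hab, if_neg h2, hq]
    norm_num

theorem pvMemPyRange (a b s i : Int) (hs : 0 < s) (hi : i ∈ PySem.List.pyRange a b s) :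
    a ≤ i ∧ i < b := by
  by_cases hab : a < b
  · rw [pvPyRange_pos_cons a b s hs hab] at hi
    rcases List.mem_cons.1 hi with h | h
    · omega
    · have := pvMemPyRange (a + s) b s i hs h
      omega
  · rw [pvPyRange_pos_nil a b s hs (by omega)] at hi
    simp at hi
termination_by (b - a).toNat
decreasing_by omega

-- chunk length in closed form
theorem pvChunkLen (words : List String) (a cs : Int) (ha : 0 ≤ a) (hcs : 0 < cs) :
    ((PySem.List.slice words (some a) (some (a + cs))).length : Int)
      = min (a + cs) (words.length : Int) - min a (words.length : Int) := by
  rw [PySem.List.length_slice]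
  simp only [PySem.List.clampIdx]
  split_ifs <;> push_cast <;> omega

-- the tokens of one chunk (as a flat list: chunk words then the timestamp token)
def pvChunkTokens (words : List String) (cs : Int) (i : Int) : List String :=
  PySem.List.slice words (some i) (some (i + cs))
    ++ [PySem.Int.toStr (200 * i) ++ "_" ++ PySem.Int.toStr (200 * min (i + cs) (words.length : Int))]

-- floored division characterization (positive divisor)
theorem pvEdivEq (cs x q : Int) (hcs : 0 < cs) (h1 : cs * q ≤ x) (h2 : x < cs * q + cs) :
    x / cs = q := by
  have e1 : q * cs = cs * q := mul_comm q cs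
  have e2 : (q + 1) * cs = cs * q + cs := by ring
  have hl : q ≤ x / cs := (Int.le_ediv_iff_mul_le hcs).2 (by omega)
  have hr : x / cs < q + 1 := (Int.ediv_lt_iff_lt_mul hcs).2 (by omega)
  omega

-- slicing off the head element
theorem pvSliceCons (words : List String) (p b : Int) (hp : 0 ≤ p)
    (hpb : p < b) (hpn : p.toNat < words.length) :
    PySem.List.slice words (some p) (some b)
      = words[p.toNat] :: PySem.List.slice words (some (p + 1)) (some b) := by
  rw [PySem.List.slice_toNat words hp (by omega), PySem.List.slice_toNat words (by omega) (by omega)]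
  rw [List.drop_eq_getElem_cons hpn]
  have h1 : b.toNat - p.toNat = (b.toNat - (p + 1).toNat) + 1 := by omega
  rw [h1, List.take_succ_cons, show (p + 1).toNat = p.toNat + 1 from by omega]

-- B's flat pass, from any position p (0-based), equals: rest of the current chunk, its timestamp
-- token, then the tokens of all later chunks
theorem pvTok (words : List String) (cs : Int) (hcs : 0 < cs) (p : Int)
    (hp0 : 0 ≤ p) (hpn : p < (words.length : Int)) :
    pvBTokens cs (words.length : Int) (p + 1) (words.drop p.toNat)
      = PySem.List.slice words (some p) (some (cs * (p / cs) + cs))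
        ++ [PySem.Int.toStr (200 * (cs * (p / cs))) ++ "_"
              ++ PySem.Int.toStr (200 * min (cs * (p / cs) + cs) (words.length : Int))]
        ++ (PySem.List.pyRange (min (cs * (p / cs) + cs) (words.length : Int)) (words.length : Int) cs).flatMap
            (pvChunkTokens words cs) := by
  have hn : p.toNat < words.length := by omega
  have hdm := Int.ediv_add_emod p cs
  have hm0 : 0 ≤ p % cs := Int.emod_nonneg p (by omega)
  have hmlt : p % cs < cs := Int.emod_lt_of_pos p hcs
  have ha1 : cs * (p / cs) ≤ p := by omega
  have ha2 : p < cs * (p / cs) + cs := by omega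
  rw [List.drop_eq_getElem_cons hn]
  simp only [pvBTokens]
  rw [PySem.Int.mod_eq_emod_of_pos hcs, PySem.Int.floordiv_eq_ediv_of_pos hcs]
  rw [show p + 1 - 1 = p from by ring]
  by_cases hbnd : (p + 1) % cs = 0 ∨ p + 1 = (words.length : Int)
  · have hcond : ((p + 1) % cs == 0 || p + 1 == (words.length : Int)) = true := by
      rcases hbnd with h | h <;> simp [h]
    rw [if_pos hcond]
    have hpb : p + 1 = min (cs * (p / cs) + cs) (words.length : Int) := by
      rcases hbnd with h | h
      · obtain ⟨k, hk⟩ := Int.dvd_of_emod_eq_zero h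
        have e : cs * (k - 1) = cs * k - cs := by ring
        have hq : p / cs = k - 1 := pvEdivEq cs p (k - 1) hcs (by omega) (by omega)
        rw [hq]; omega
      · omega
    by_cases hlast : p + 1 = (words.length : Int)
    · rw [show p.toNat + 1 = ((p + 1).toNat : Nat) from by omega,
        List.drop_eq_nil_of_le (by omega : words.length ≤ (p + 1).toNat)]
      simp only [pvBTokens]
      have hs1 : PySem.List.slice words (some p) (some (cs * (p / cs) + cs)) = [words[p.toNat]] := by
        rw [pvSliceCons words p _ hp0 (by omega) hn]
        rw [PySem.List.slice_toNat words (by omega) (by omega)]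
        rw [List.drop_eq_nil_of_le (by omega : words.length ≤ (p + 1).toNat)]
        simp
      rw [hs1, pvPyRange_pos_nil _ _ _ hcs (by omega)]
      rw [← hpb, show 200 * cs * (p / cs) = 200 * (cs * (p / cs)) from by ring]
      simp
    · have hlt2 : p + 1 < (words.length : Int) := by omega
      have haeq : cs * (p / cs) + cs = p + 1 := by omega
      have hq1 : (p + 1) / cs = p / cs + 1 := by
        have e : cs * (p / cs + 1) = cs * (p / cs) + cs := by ring
        exact pvEdivEq cs (p + 1) (p / cs + 1) hcs (by omega) (by omega)
      have IH := pvTok words cs hcs (p + 1) (by omega) hlt2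
      rw [hq1, show cs * (p / cs + 1) = p + 1 from by
        rw [show cs * (p / cs + 1) = cs * (p / cs) + cs from by ring]; omega] at IH
      rw [show p.toNat + 1 = ((p + 1).toNat : Nat) from by omega, IH]
      have hs1 : PySem.List.slice words (some p) (some (cs * (p / cs) + cs)) = [words[p.toNat]] := by
        rw [haeq, pvSliceCons words p (p + 1) hp0 (by omega) hn]
        rw [PySem.List.slice_toNat words (by omega) (by omega)]
        simp
      rw [hs1, show min (cs * (p / cs) + cs) (words.length : Int) = p + 1 from by omega]
      rw [pvPyRange_pos_cons (p + 1) _ cs hcs hlt2]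
      simp only [List.flatMap_cons, pvChunkTokens]
      have hrange : PySem.List.pyRange (min (p + 1 + cs) (words.length : Int)) (words.length : Int) cs
          = PySem.List.pyRange (p + 1 + cs) (words.length : Int) cs := by
        by_cases hle : p + 1 + cs ≤ (words.length : Int)
        · rw [show min (p + 1 + cs) (words.length : Int) = p + 1 + cs from by omega]
        · rw [pvPyRange_pos_nil _ _ _ hcs (by omega), pvPyRange_pos_nil _ _ _ hcs (by omega)]
      rw [hrange, ← haeq, show 200 * cs * (p / cs) = 200 * (cs * (p / cs)) from by ring]
      simp [List.append_assoc]
  · push_neg at hbnd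
    have hcond : ¬ (((p + 1) % cs == 0 || p + 1 == (words.length : Int)) = true) := by
      simpa using hbnd
    rw [if_neg hcond]
    have hlt2 : p + 1 < (words.length : Int) := by
      rcases lt_or_eq_of_le (by omega : p + 1 ≤ (words.length : Int)) with h | h
      · exact h
      · exact absurd h hbnd.2
    have hplt : p + 1 < cs * (p / cs) + cs := by
      rcases lt_or_eq_of_le (by omega : p + 1 ≤ cs * (p / cs) + cs) with h | h
      · exact h
      · exfalso
        apply hbnd.1
        rw [h, show cs * (p / cs) + cs = cs * (p / cs + 1) from by ring]
        exact Int.mul_emod_right cs (p / cs + 1)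
    have hq1 : (p + 1) / cs = p / cs := pvEdivEq cs (p + 1) (p / cs) hcs (by omega) (by omega)
    have IH := pvTok words cs hcs (p + 1) (by omega) hlt2
    rw [hq1] at IH
    rw [show p.toNat + 1 = ((p + 1).toNat : Nat) from by omega, IH]
    rw [pvSliceCons words p (cs * (p / cs) + cs) hp0 (by omega) hn]
    simp [List.append_assoc]
termination_by ((words.length : Int) - p).toNat
decreasing_by all_goals omega

-- A's foldl over chunk starts, with current_time = 200*a, in closed form
theorem pvLoop (words : List String) (cs : Int) (hcs : 0 < cs) (a : Int) (ha : 0 ≤ a)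
    (acc : List String) :
    (PySem.List.pyRange a (words.length : Int) cs).foldl
      (fun (st : List String × Int) (i : Int) =>
        (st.1 ++ [PySem.Str.join " " (PySem.List.slice words (some i) (some (i + cs))) ++ " " ++
            PySem.Int.toStr st.2 ++ "_" ++
            PySem.Int.toStr (st.2 + ((PySem.List.slice words (some i) (some (i + cs))).length : Int) * 200)],
         st.2 + ((PySem.List.slice words (some i) (some (i + cs))).length : Int) * 200))
      (acc, 200 * a)
    = (acc ++ (PySem.List.pyRange a (words.length : Int) cs).map
        (fun i => PySem.Str.join " " (PySem.List.slice words (some i) (some (i + cs))) ++ " " ++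
          PySem.Int.toStr (200 * i) ++ "_" ++ PySem.Int.toStr (200 * min (i + cs) (words.length : Int))),
       200 * max a (words.length : Int)) := by
  by_cases hlt : a < (words.length : Int)
  · rw [pvPyRange_pos_cons a _ cs hcs hlt]
    simp only [List.foldl_cons, List.map_cons]
    have hL := pvChunkLen words a cs ha hcs
    have hend : 200 * a + ((PySem.List.slice words (some a) (some (a + cs))).length : Int) * 200
        = 200 * min (a + cs) (words.length : Int) := by omega
    rw [hend]
    by_cases h2 : a + cs < (words.length : Int)
    · have hmin : min (a + cs) (words.length : Int) = a + cs := by omega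
      rw [hmin]
      rw [pvLoop words cs hcs (a + cs) (by omega)]
      have hmax : max a (words.length : Int) = max (a + cs) (words.length : Int) := by omega
      rw [hmax]
      simp
    · have hmin : min (a + cs) (words.length : Int) = (words.length : Int) := by omega
      rw [hmin]
      rw [pvPyRange_pos_nil (a + cs) _ cs hcs (by omega)]
      have hmax : max a (words.length : Int) = (words.length : Int) := by omega
      simp [hmax]
  · rw [pvPyRange_pos_nil a _ cs hcs (by omega)]
    have hmax : max a (words.length : Int) = a := by omega
    simp [hmax]
termination_by ((words.length : Int) - a).toNat
decreasing_by omega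

-- join of a flatMap of nonempty groups = join of the per-group joins
theorem pvJoinFlatMap (f : Int → List String) (g : Int → String) (l : List Int)
    (h : ∀ i ∈ l, f i ≠ [] ∧ PySem.Str.join " " (f i) = g i) :
    PySem.Str.join " " (l.flatMap f) = PySem.Str.join " " (l.map g) := by
  induction l with
  | nil => rfl
  | cons i t ih =>
    have hi := h i (by simp)
    cases t with
    | nil =>
      simp only [List.flatMap_cons, List.flatMap_nil, List.append_nil, List.map_cons,
        List.map_nil, pvJoinSingleton]
      exact hi.2
    | cons j t' =>
      have hj := h j (by simp)
      have hne : (j :: t').flatMap f ≠ [] := by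
        simp only [List.flatMap_cons]
        intro hc
        exact hj.1 (List.append_eq_nil_iff.1 hc).1
      rw [List.flatMap_cons, pvJoinAppend _ _ hi.1 hne, ih (fun x hx => h x (by simp [hx]))]
      rw [hi.2]
      simp only [List.map_cons, pvJoinCons]

-- the whole token stream = the chunk tokens in order; joining gives A's chunk strings joined
theorem pvMain (words : List String) (cs : Int) (hcs : 0 < cs) :
    PySem.Str.join " " (pvBTokens cs (words.length : Int) 1 words)
      = PySem.Str.join " " ((PySem.List.pyRange 0 (words.length : Int) cs).map
          (fun i => PySem.Str.join " " (PySem.List.slice words (some i) (some (i + cs))) ++ " " ++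
            PySem.Int.toStr (200 * i) ++ "_" ++ PySem.Int.toStr (200 * min (i + cs) (words.length : Int)))) := by
  by_cases hnil : words = []
  · subst hnil
    rw [pvPyRange_pos_nil _ _ _ hcs (by simp)]
    rfl
  · have hlen : 0 < (words.length : Int) := by
      have := List.length_pos_iff.2 hnil
      omega
    have htok := pvTok words cs hcs 0 le_rfl hlen
    simp only [Int.zero_ediv, mul_zero, zero_add, Int.toNat_zero, List.drop_zero] at htok
    rw [htok]
    have hflat : PySem.List.slice words (some 0) (some cs)
          ++ [PySem.Int.toStr 0 ++ "_" ++ PySem.Int.toStr (200 * min cs (words.length : Int))]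
          ++ (PySem.List.pyRange (min cs (words.length : Int)) (words.length : Int) cs).flatMap
              (pvChunkTokens words cs)
        = (PySem.List.pyRange 0 (words.length : Int) cs).flatMap (pvChunkTokens words cs) := by
      rw [pvPyRange_pos_cons 0 _ cs hcs hlen]
      simp only [List.flatMap_cons, pvChunkTokens, zero_add]
      have hrange : PySem.List.pyRange (min cs (words.length : Int)) (words.length : Int) cs
          = PySem.List.pyRange cs (words.length : Int) cs := by
        by_cases hle : cs ≤ (words.length : Int)
        · rw [show min cs (words.length : Int) = cs from by omega]
        · rw [pvPyRange_pos_nil _ _ _ hcs (by omega), pvPyRange_pos_nil _ _ _ hcs (by omega)]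
      rw [hrange]
      norm_num
    rw [hflat]
    apply pvJoinFlatMap
    intro i hi
    have hmem := pvMemPyRange 0 _ cs i hcs hi
    have hlen2 := pvChunkLen words i cs (by omega) hcs
    have hsne : PySem.List.slice words (some i) (some (i + cs)) ≠ [] := by
      intro hc
      rw [hc] at hlen2
      simp at hlen2
      omega
    refine ⟨by simp [pvChunkTokens], ?_⟩
    unfold pvChunkTokens
    rw [pvJoinAppend _ _ hsne (by simp), pvJoinSingleton]
    rw [← String.toList_inj]
    simp

-- ===== VERDICT =====
theorem add_timestamps_spec : Claim_equal_add_timestamps := by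
  intro text timestamps _
  unfold Spec_add_timestamps
  have hcs : 0 < min 10 (max 3 (PySem.Int.floordiv ((PySem.Str.split₀ text).length : Int) 5)) := by
    have h1 : (3 : Int) ≤ max 3 (PySem.Int.floordiv ((PySem.Str.split₀ text).length : Int) 5) :=
      le_max_left _ _
    omega
  have key := pvLoop (PySem.Str.split₀ text)
      (min 10 (max 3 (PySem.Int.floordiv ((PySem.Str.split₀ text).length : Int) 5))) hcs
      0 (by omega) []
  simp only [mul_zero] at key
  have hmain := pvMain (PySem.Str.split₀ text)
      (min 10 (max 3 (PySem.Int.floordiv ((PySem.Str.split₀ text).length : Int) 5))) hcs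
  match timestamps with
  | none =>
    simp only [add_timestamps, add_timestamps_alt, Option.getD, List.isEmpty, if_pos]
    rw [key, hmain]
    simp
  | some [] =>
    simp only [add_timestamps, add_timestamps_alt, Option.getD, List.isEmpty, if_pos]
    rw [key, hmain]
    simp
  | some (h :: t) =>
    simp [add_timestamps, add_timestamps_alt]
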